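-- pv_equiv track=rewrite | github.com/OpenUnited/platform | analyse_templates.py | find_template_references
-- ===== SOURCE A (Python) =====
-- def find_template_references(template_content):
--     """Find extends and include statements in template content."""
--     references = set()
--
--     # Look for extends tags
--     if '{% extends' in template_content:
--         extends_start = template_content.find('{% extends')
--         extends_end = template_content.find('%}', extends_start)
--         if extends_start != -1 and extends_end != -1:
--             extends_tag = template_content[extends_start:extends_end]
--             # Look for template name in either single or double quotes
--             try:
--                 if '"' in extends_tag:
--                     template_name = extends_tag.split('"')[1]
--                 elif "'" in extends_tag:
--                     template_name = extends_tag.split("'")[1]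
--                 else:
--                     template_name = extends_tag.split()[1].strip('"').strip("'")
--                 references.add(template_name)
--             except (IndexError, ValueError):
--                 pass
--
--     # Look for include tags
--     start = 0
--     while True:
--         include_start = template_content.find('{% include', start)
--         if include_start == -1:
--             break
--
--         include_end = template_content.find('%}', include_start)
--         if include_end != -1:
--             include_tag = template_content[include_start:include_end]
--             try:
--                 if '"' in include_tag:
--                     template_name = include_tag.split('"')[1]
--                 elif "'" in include_tag:
--                     template_name = include_tag.split("'")[1]
--                 else:
--                     template_name = include_tag.split()[1].strip('"').strip("'")
--                 references.add(template_name)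
--             except (IndexError, ValueError):
--                 pass
--         start = include_end if include_end != -1 else len(template_content)
--
--     # Also look for load tags that might load custom template tags
--     start = 0
--     while True:
--         load_start = template_content.find('{% load', start)
--         if load_start == -1:
--             break
--
--         load_end = template_content.find('%}', load_start)
--         if load_end != -1:
--             load_tag = template_content[load_start:load_end]
--             try:
--                 # Add loaded template tags to references with a special prefix
--                 tags = load_tag.split()[1:]
--                 for tag in tags:
--                     references.add(f"templatetag:{tag.strip()}")
--             except (IndexError, ValueError):
--                 pass
--         start = load_end if load_end != -1 else len(template_content)
--
--     return references
-- ===== SOURCE B (Python) =====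
-- def find_template_references(template_content):
--     """Find extends and include statements in template content."""
--     references = set()
--     # Every '{% ... %}' tag body lies inside one '%}'-delimited chunk, so split
--     # once and scan chunks instead of advancing a find() pointer over the text.
--     chunks = template_content.split('%}')
--
--     def quoted_name(tag):
--         if '"' in tag:
--             return tag.split('"')[1]
--         if "'" in tag:
--             return tag.split("'")[1]
--         parts = tag.split()
--         if len(parts) > 1:
--             return parts[1].strip('"').strip("'")
--         return None
--
--     # extends: only the first occurrence counts
--     for chunk in chunks[:-1]:
--         i = chunk.find('{% extends')
--         if i != -1:
--             name = quoted_name(chunk[i:])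
--             if name is not None:
--                 references.add(name)
--             break
--
--     # include: first occurrence in each chunk
--     for chunk in chunks[:-1]:
--         i = chunk.find('{% include')
--         if i != -1:
--             name = quoted_name(chunk[i:])
--             if name is not None:
--                 references.add(name)
--
--     # load: first occurrence in each chunk
--     for chunk in chunks[:-1]:
--         i = chunk.find('{% load')
--         if i != -1:
--             for tag in chunk[i:].split()[1:]:
--                 references.add("templatetag:" + tag.strip())
--
--     return references
-- ===== Notes on version B (the rewrite author's own statement) =====
-- stated objective: alternative
-- what changed: A scans the text with three hand-rolled find()/advance pointer loops (and a separate straight-line extends block); B splits the content once on '%}' and processes each chunk independently (first-match per chunk, break-on-first for extends), keeping the quote-splitting name extraction unchanged.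
import Mathlib
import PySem

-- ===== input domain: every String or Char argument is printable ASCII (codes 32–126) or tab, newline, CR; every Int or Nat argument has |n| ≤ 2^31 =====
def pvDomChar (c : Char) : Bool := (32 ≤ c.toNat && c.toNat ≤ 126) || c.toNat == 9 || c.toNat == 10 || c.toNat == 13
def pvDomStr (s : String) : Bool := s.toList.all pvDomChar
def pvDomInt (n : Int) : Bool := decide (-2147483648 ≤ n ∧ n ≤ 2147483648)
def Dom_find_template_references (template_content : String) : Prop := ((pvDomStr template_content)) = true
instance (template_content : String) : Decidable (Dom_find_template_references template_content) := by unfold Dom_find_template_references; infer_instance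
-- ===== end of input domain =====

-- B replaces A's three find()/advance pointer scans by splitting the text once on '%}' and
-- scanning the resulting chunks; the quote-splitting name extraction logic is shared unchanged.

-- ===== PORT A =====
-- the string literals both Pythons search for, as character lists
def pvEE : List Char := ['%', '}']
def pvExt : List Char := ['{', '%', ' ', 'e', 'x', 't', 'e', 'n', 'd', 's']
def pvInc : List Char := ['{', '%', ' ', 'i', 'n', 'c', 'l', 'u', 'd', 'e']
def pvLoad : List Char := ['{', '%', ' ', 'l', 'o', 'a', 'd']

-- the try-block extracting a template name from a tag (textually identical in A's extends and
-- include branches, and B's quoted_name helper); none = the caught IndexError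
def pvName? (tag : List Char) : Option (List Char) :=
  if PySem.Chars.isIn ['"'] tag then (PySem.Chars.splitOn tag ['"'])[1]?
  else if PySem.Chars.isIn ['\''] tag then (PySem.Chars.splitOn tag ['\''])[1]?
  else ((PySem.Chars.split₀ tag)[1]?).map
      (fun t => PySem.Chars.stripChars (PySem.Chars.stripChars t ['"']) ['\''])

-- 'references.add(template_name)' guarded by the try/except
def pvAddName (refs : PySem.Set (List Char)) (tag : List Char) : PySem.Set (List Char) :=
  match pvName? tag with
  | some n => PySem.Set.add refs n
  | none => refs

-- the load branch body: for tag in load_tag.split()[1:]: references.add("templatetag:" + tag.strip())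
def pvAddLoad (refs : PySem.Set (List Char)) (tag : List Char) : PySem.Set (List Char) :=
  ((PySem.Chars.split₀ tag).drop 1).foldl
    (fun r t => PySem.Set.add r ("templatetag:".toList ++ PySem.Chars.strip t)) refs

-- A's extends block: first '{% extends', first '%}' after it
def pvExtA (pat : List Char) (f : PySem.Set (List Char) → List Char → PySem.Set (List Char))
    (cs : List Char) (refs : PySem.Set (List Char)) : PySem.Set (List Char) :=
  if PySem.Chars.isIn pat cs then
    let i := PySem.Chars.find cs pat
    let e := PySem.Chars.findFrom cs pvEE i
    if i ≠ -1 ∧ e ≠ -1 then f refs (PySem.List.slice cs (some i) (some e)) else refs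
  else refs

-- A's 'while True' find/advance loop (include and load); fuel is a totality guard only
def pvLoopA (pat : List Char) (f : PySem.Set (List Char) → List Char → PySem.Set (List Char))
    (cs : List Char) : Nat → Int → PySem.Set (List Char) → PySem.Set (List Char)
  | 0, _, refs => refs
  | fuel + 1, start, refs =>
    let i := PySem.Chars.findFrom cs pat start
    if i = -1 then refs
    else
      let e := PySem.Chars.findFrom cs pvEE i
      if e ≠ -1 then
        pvLoopA pat f cs fuel e (f refs (PySem.List.slice cs (some i) (some e)))
      else pvLoopA pat f cs fuel (cs.length : Int) refs

def find_template_references (template_content : String) : List String :=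
  (pvLoopA pvLoad pvAddLoad template_content.toList (template_content.toList.length + 2) 0
    (pvLoopA pvInc pvAddName template_content.toList (template_content.toList.length + 2) 0
      (pvExtA pvExt pvAddName template_content.toList PySem.Set.empty))).map String.ofList

-- ===== PORT B =====
-- per-chunk step: first pattern occurrence in the chunk, tag = chunk[i:]
def pvChunkStep (pat : List Char) (f : PySem.Set (List Char) → List Char → PySem.Set (List Char))
    (refs : PySem.Set (List Char)) (chunk : List Char) : PySem.Set (List Char) :=
  let i := PySem.Chars.find chunk pat
  if i ≠ -1 then f refs (PySem.List.slice chunk (some i) none) else refs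

-- B's extends loop (breaks at the first matching chunk)
def pvExtScan (pat : List Char) (f : PySem.Set (List Char) → List Char → PySem.Set (List Char)) :
    List (List Char) → PySem.Set (List Char) → PySem.Set (List Char)
  | [], refs => refs
  | c :: rest, refs =>
    let i := PySem.Chars.find c pat
    if i ≠ -1 then f refs (PySem.List.slice c (some i) none) else pvExtScan pat f rest refs

def find_template_references_alt (template_content : String) : List String :=
  (((PySem.Chars.splitOn template_content.toList pvEE).dropLast).foldl
      (pvChunkStep pvLoad pvAddLoad)
      (((PySem.Chars.splitOn template_content.toList pvEE).dropLast).foldl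
        (pvChunkStep pvInc pvAddName)
        (pvExtScan pvExt pvAddName ((PySem.Chars.splitOn template_content.toList pvEE).dropLast)
          PySem.Set.empty))).map String.ofList

-- ===== PRECONDITION & SPEC =====
def Spec_find_template_references (template_content : String) (out : List String) : Prop := out = find_template_references_alt template_content
instance (template_content : String) (out : List String) : Decidable (Spec_find_template_references template_content out) := by unfold Spec_find_template_references; infer_instance

-- ===== CLAIM (what is proved, stated in full; the proofs are below) =====
def Claim_equal_find_template_references : Prop := ∀ (template_content : String), Dom_find_template_references template_content → Spec_find_template_references template_content (find_template_references template_content)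

-- ===== LEMMAS AND PROOFS =====

theorem pv_find_neg {s sub : List Char} :
    PySem.Chars.find s sub = -1 ↔ ∀ j, ¬ sub <+: s.drop j := by
  have h1 := PySem.Chars.exists_prefix_drop_iff_isIn sub s
  have h2 := PySem.Chars.isIn_iff_infix sub s
  rw [PySem.Chars.find_eq_neg_one_iff]
  constructor
  · intro h j hj; exact h (h2.mp (h1.mp ⟨j, hj⟩))
  · intro h hinf; obtain ⟨j, hj⟩ := h1.mpr (h2.mpr hinf); exact h j hj

theorem pv_find_eq {s sub : List Char} {k : Nat} (h1 : sub <+: s.drop k)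
    (h2 : ∀ i < k, ¬ sub <+: s.drop i) : PySem.Chars.find s sub = (k : Int) := by
  have hinf : sub <:+: s := h1.isInfix.trans (List.drop_suffix k s).isInfix
  have hnn : 0 ≤ PySem.Chars.find s sub := (PySem.Chars.find_nonneg_iff s sub).mpr hinf
  obtain ⟨hpre, hmin⟩ := PySem.Chars.find_spec hnn
  set m := (PySem.Chars.find s sub).toNat with hm
  have : m = k := by
    rcases lt_trichotomy m k with h | h | h
    · exact absurd hpre (h2 m h)
    · exact h
    · exact absurd h1 (hmin k h)
  omega

theorem pv_occ_le {s sub : List Char} {k : Nat} (hsub : sub ≠ []) (h : sub <+: s.drop k) :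
    k + sub.length ≤ s.length := by
  have hl := h.length_le
  rw [List.length_drop] at hl
  by_cases hk : k ≤ s.length
  · omega
  · exfalso
    have : s.drop k = [] := List.drop_eq_nil_of_le (by omega)
    rw [this, List.prefix_nil] at h
    exact hsub h

theorem pv_find_shift {s sub : List Char} (k : Nat)
    (h : ∀ j < k, ¬ sub <+: s.drop j) :
    PySem.Chars.find s sub =
      if PySem.Chars.find (s.drop k) sub = -1 then -1
      else (k : Int) + PySem.Chars.find (s.drop k) sub := by
  by_cases hneg : PySem.Chars.find (s.drop k) sub = -1
  · simp only [hneg, if_true]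
    rw [pv_find_neg]
    intro j hj
    rcases lt_or_ge j k with hjk | hjk
    · exact h j hjk hj
    · have : s.drop j = (s.drop k).drop (j - k) := by rw [List.drop_drop]; congr 1; omega
      rw [this] at hj
      exact (pv_find_neg.mp hneg) _ hj
  · simp only [hneg, if_false]
    have hnn : 0 ≤ PySem.Chars.find (s.drop k) sub := by
      have := PySem.Chars.neg_one_le_find (s.drop k) sub
      omega
    obtain ⟨hpre, hmin⟩ := PySem.Chars.find_spec hnn
    set q := (PySem.Chars.find (s.drop k) sub).toNat with hq
    have hpre' : sub <+: s.drop (k + q) := by rw [← List.drop_drop]; exact hpre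
    have : PySem.Chars.find s sub = ((k + q : Nat) : Int) := by
      apply pv_find_eq hpre'
      intro i hi
      rcases lt_or_ge i k with hik | hik
      · exact h i hik
      · have : s.drop i = (s.drop k).drop (i - k) := by rw [List.drop_drop]; congr 1; omega
        rw [this]; exact hmin (i - k) (by omega)
    rw [this]; push_cast; omega

-- cons-level chunk decomposition

theorem pv_find_pos {s sub : List Char} (hsub : sub ≠ []) (h : ¬ PySem.Chars.find s sub = -1) :
    ∃ q : Nat, PySem.Chars.find s sub = (q : Int) ∧ sub <+: s.drop q ∧
      (∀ i < q, ¬ sub <+: s.drop i) ∧ q + sub.length ≤ s.length := by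
  have hnn : 0 ≤ PySem.Chars.find s sub := by
    have := PySem.Chars.neg_one_le_find s sub; omega
  obtain ⟨hpre, hmin⟩ := PySem.Chars.find_spec hnn
  refine ⟨(PySem.Chars.find s sub).toNat, by omega, hpre, hmin, pv_occ_le hsub hpre⟩

def pvChunks (s : List Char) : List (List Char) :=
  let p := PySem.Chars.find s pvEE
  if h : p < 0 then [s]
  else s.take p.toNat :: pvChunks (s.drop (p.toNat + 2))
termination_by s.length
decreasing_by
  have hnn : (0:Int) ≤ PySem.Chars.find s pvEE := by omega
  have hinf : pvEE <:+: s := (PySem.Chars.find_nonneg_iff s pvEE).mp hnn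
  have hle := hinf.length_le
  have h2 : pvEE.length = 2 := rfl
  simp only [List.length_drop]
  omega

theorem pvChunks_neg {s : List Char} (h : PySem.Chars.find s pvEE = -1) :
    pvChunks s = [s] := by
  rw [pvChunks]; simp [h]

theorem pvChunks_pos {s : List Char} {p : Nat} (h : PySem.Chars.find s pvEE = (p : Int)) :
    pvChunks s = s.take p :: pvChunks (s.drop (p + 2)) := by
  rw [pvChunks]
  simp only [h]
  norm_num

theorem pvChunks_ne_nil (s : List Char) : pvChunks s ≠ [] := by
  rw [pvChunks]; split <;> simp

-- see p1 lemmas (assume available): restate quickly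

theorem pvChunks_cons {c : Char} {rest : List Char} (h : ¬ pvEE <+: (c :: rest)) :
    pvChunks (c :: rest) = (c :: (pvChunks rest).headI) :: (pvChunks rest).tail := by
  have hshift := pv_find_shift (s := c :: rest) (sub := pvEE) 1
    (by intro j hj; interval_cases j; simpa using h)
  simp only [List.drop_one, List.tail_cons] at hshift
  by_cases hr : PySem.Chars.find rest pvEE = -1
  · rw [hr, if_pos rfl] at hshift
    rw [pvChunks_neg hshift, pvChunks_neg hr]
    simp
  · have hnn : 0 ≤ PySem.Chars.find rest pvEE := by
      have := PySem.Chars.neg_one_le_find rest pvEE; omega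
    set q := (PySem.Chars.find rest pvEE).toNat with hq
    have hrq : PySem.Chars.find rest pvEE = (q : Int) := by omega
    rw [if_neg hr, hrq] at hshift
    have hcq : PySem.Chars.find (c :: rest) pvEE = ((q + 1 : Nat) : Int) := by
      rw [hshift]; push_cast; ring
    rw [pvChunks_pos hcq, pvChunks_pos hrq]
    simp only [List.take_succ_cons, List.drop_succ_cons, List.headI, List.tail]

theorem pvChunks_prefix_case {l : List Char} (h : pvEE <+: l) :
    pvChunks l = [] :: pvChunks (l.drop 2) := by
  have h0 : PySem.Chars.find l pvEE = ((0 : Nat) : Int) :=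
    pv_find_eq (by simpa using h) (by omega)
  rw [pvChunks_pos h0]
  simp

theorem pv_recomp {α : Type} [Inhabited α] {l : List α} (h : l ≠ []) : l.headI :: l.tail = l := by
  cases l with
  | nil => exact absurd rfl h
  | cons a t => rfl

theorem pv_go_zero (sep l cur : List Char) (acc : List (List Char)) :
    PySem.Chars.splitOn.go sep 0 l cur acc = ((cur.reverse ++ l) :: acc).reverse := rfl

theorem pv_go_succ_nil (sep cur : List Char) (fuel : Nat) (acc : List (List Char)) :
    PySem.Chars.splitOn.go sep (fuel + 1) [] cur acc = (cur.reverse :: acc).reverse := rfl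

theorem pv_go_succ_cons (sep cur : List Char) (fuel : Nat) (c : Char) (rest : List Char)
    (acc : List (List Char)) :
    PySem.Chars.splitOn.go sep (fuel + 1) (c :: rest) cur acc =
      if sep.isPrefixOf (c :: rest) then
        PySem.Chars.splitOn.go sep fuel (List.drop sep.length (c :: rest)) [] (cur.reverse :: acc)
      else PySem.Chars.splitOn.go sep fuel rest (c :: cur) acc := rfl

theorem pv_go_chunks : ∀ (fuel : Nat) (l cur : List Char) (acc : List (List Char)),
    l.length ≤ fuel →
    PySem.Chars.splitOn.go pvEE fuel l cur acc =
      acc.reverse ++ (cur.reverse ++ (pvChunks l).headI) :: (pvChunks l).tail := by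
  intro fuel
  induction fuel with
  | zero =>
    intro l cur acc hl
    have : l = [] := List.length_eq_zero_iff.mp (by omega)
    subst this
    rw [pv_go_zero]
    rw [pvChunks_neg (pv_find_neg.mpr (by intro j hj; simp [pvEE] at hj))]
    simp [List.headI, List.tail]
  | succ fuel ih =>
    intro l cur acc hl
    cases l with
    | nil =>
      rw [pv_go_succ_nil]
      rw [pvChunks_neg (pv_find_neg.mpr (by intro j hj; simp [List.prefix_nil, pvEE] at hj))]
      simp [List.headI, List.tail]
    | cons c rest =>
      rw [pv_go_succ_cons]
      by_cases hp : pvEE.isPrefixOf (c :: rest)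
      · rw [if_pos hp]
        have hpre : pvEE <+: (c :: rest) := List.isPrefixOf_iff_prefix.mp hp
        have hdl : (List.drop pvEE.length (c :: rest)).length ≤ fuel := by
          have h2 : pvEE.length = 2 := rfl
          simp only [List.length_drop, h2, List.length_cons] at *
          omega
        rw [ih _ _ _ hdl]
        rw [pvChunks_prefix_case hpre]
        rw [show List.drop pvEE.length (c :: rest) = List.drop 2 (c :: rest) from rfl]
        obtain ⟨a, t, hat⟩ : ∃ a t, pvChunks (List.drop 2 (c :: rest)) = a :: t := by
          cases h : pvChunks (List.drop 2 (c :: rest)) with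
          | nil => exact absurd h (pvChunks_ne_nil _)
          | cons a t => exact ⟨a, t, rfl⟩
        simp
        rw [pv_recomp (pvChunks_ne_nil _)]
      · rw [if_neg hp]
        have hnp : ¬ pvEE <+: (c :: rest) := fun hc => hp (List.isPrefixOf_iff_prefix.mpr hc)
        have : rest.length ≤ fuel := by simp at hl; omega
        rw [ih _ _ _ this]
        rw [pvChunks_cons hnp]
        obtain ⟨a, t, hat⟩ : ∃ a t, pvChunks rest = a :: t := by
          cases h : pvChunks rest with
          | nil => exact absurd h (pvChunks_ne_nil _)
          | cons a t => exact ⟨a, t, rfl⟩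
        simp [hat]

theorem pv_splitOn_eq_chunks (s : List Char) :
    PySem.Chars.splitOn s pvEE = pvChunks s := by
  rw [PySem.Chars.splitOn]
  rw [pv_go_chunks (s.length + 1) s [] [] (by omega)]
  have := pvChunks_ne_nil s
  cases h : pvChunks s with
  | nil => exact absurd h this
  | cons a l => simp [List.headI, List.tail]

theorem pv_chunks_infix_aux : ∀ (n : Nat) (s : List Char), s.length ≤ n →
    ∀ c ∈ pvChunks s, c <:+: s := by
  intro n
  induction n with
  | zero =>
    intro s hs c hc
    have : s = [] := List.length_eq_zero_iff.mp (by omega)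
    subst this
    rw [pvChunks_neg (pv_find_neg.mpr (by intro j hj; simp [List.prefix_nil, pvEE] at hj))] at hc
    simp only [List.mem_singleton] at hc
    subst hc
    exact List.infix_rfl
  | succ n ih =>
    intro s hs c hc
    by_cases hneg : PySem.Chars.find s pvEE = -1
    · rw [pvChunks_neg hneg] at hc
      simp only [List.mem_singleton] at hc
      subst hc
      exact List.infix_rfl
    · have hnn : 0 ≤ PySem.Chars.find s pvEE := by
        have := PySem.Chars.neg_one_le_find s pvEE; omega
      set p := (PySem.Chars.find s pvEE).toNat with hp
      have hfp : PySem.Chars.find s pvEE = (p : Int) := by omega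
      rw [pvChunks_pos hfp] at hc
      have hlen : 2 ≤ s.length := by
        have hinf : pvEE <:+: s := (PySem.Chars.find_nonneg_iff s pvEE).mp hnn
        have := hinf.length_le
        simpa [pvEE] using this
      rcases List.mem_cons.mp hc with hc | hc
      · exact hc ▸ (List.take_prefix p s).isInfix
      · have hdl : (s.drop (p + 2)).length ≤ n := by
          simp [List.length_drop]
          omega
        exact (ih _ hdl c hc).trans (List.drop_suffix (p + 2) s).isInfix

theorem pv_chunks_nomatch {pat s : List Char} (h : PySem.Chars.find s pat = -1) :
    ∀ c ∈ pvChunks s, PySem.Chars.find c pat = -1 := by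
  intro c hc
  by_contra hne
  have hnn : 0 ≤ PySem.Chars.find c pat := by
    have := PySem.Chars.neg_one_le_find c pat; omega
  have hinf : pat <:+: c := (PySem.Chars.find_nonneg_iff c pat).mp hnn
  have : pat <:+: s := hinf.trans (pv_chunks_infix_aux s.length s le_rfl c hc)
  exact (PySem.Chars.find_eq_neg_one_iff s pat).mp h this

def pvGood (pat : List Char) : Prop :=
  pat.head? = some '{' ∧ ∀ j < pat.length, pat[j]? = some '%' → pat[j + 1]? = some ' '

theorem pvGood_ext : pvGood pvExt := by constructor <;> decide
theorem pvGood_inc : pvGood pvInc := by constructor <;> decide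
theorem pvGood_load : pvGood pvLoad := by constructor <;> decide

theorem pv_pre_char {pat s : List Char} {i j : Nat} (h : pat <+: s.drop i)
    (hj : j < pat.length) : s[i + j]? = pat[j]? := by
  have h1 : (s.drop i)[j]? = pat[j]? := by
    have hlen : j < (s.drop i).length := lt_of_lt_of_le hj h.length_le
    rw [List.getElem?_eq_getElem hlen, List.getElem?_eq_getElem hj]
    exact congrArg some (h.getElem hj).symm
  rw [← h1, List.getElem?_drop]

theorem pv_no_pat_at_sep {pat s : List Char} {p : Nat} (hg : pvGood pat)
    (hp : pvEE <+: s.drop p) : ¬ pat <+: s.drop p ∧ ¬ pat <+: s.drop (p + 1) := by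
  obtain ⟨hhead, _⟩ := hg
  have hlen : 0 < pat.length := by
    cases pat with
    | nil => simp at hhead
    | cons a l => simp
  have h0 : pat[0]? = some '{' := by
    cases pat with
    | nil => simp at hhead
    | cons a l => simpa using hhead
  have hp0 : s[p + 0]? = some '%' := pv_pre_char hp (by simp [pvEE])
  have hp1 : s[p + 1]? = some '}' := pv_pre_char hp (by simp [pvEE])
  constructor
  · intro hc
    have := pv_pre_char hc hlen
    rw [h0] at this; rw [hp0] at this; simp at this
  · intro hc
    have := pv_pre_char hc hlen
    rw [h0] at this
    simp only [Nat.add_zero] at this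
    rw [hp1] at this; simp at this

theorem pv_no_overlap {pat s : List Char} {i p : Nat} (hg : pvGood pat)
    (hpat : pat <+: s.drop i) (hsep : pvEE <+: s.drop p) (hip : i < p) :
    i + pat.length ≤ p := by
  by_contra hc
  rw [Nat.not_le] at hc
  set j := p - i with hj
  have hjlt : j < pat.length := by omega
  have h1 : s[p]? = some '%' := by
    have := pv_pre_char hsep (show 0 < pvEE.length by simp [pvEE]); simpa using this
  have h2 : pat[j]? = some '%' := by
    have := pv_pre_char hpat hjlt
    rw [show i + j = p by omega] at this
    rw [h1] at this; exact this.symm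
  have h3 := hg.2 j hjlt h2
  have hj1 : j + 1 < pat.length := by
    by_contra hn
    rw [List.getElem?_eq_none (by omega)] at h3
    simp at h3
  have h4 : s[p + 1]? = some ' ' := by
    have := pv_pre_char hpat hj1
    rw [show i + (j + 1) = p + 1 by omega] at this
    rw [h3] at this; exact this
  have h5 : s[p + 1]? = some '}' := pv_pre_char hsep (show 1 < pvEE.length by simp [pvEE])
  rw [h4] at h5; simp at h5

def pvLoopR (pat : List Char) (f : PySem.Set (List Char) → List Char → PySem.Set (List Char)) :
    Nat → List Char → PySem.Set (List Char) → PySem.Set (List Char)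
  | 0, _, refs => refs
  | fuel + 1, s, refs =>
    let i := PySem.Chars.find s pat
    if i = -1 then refs
    else
      let e := PySem.Chars.findFrom s pvEE i
      if e ≠ -1 then
        pvLoopR pat f fuel (s.drop e.toNat) (f refs (PySem.List.slice s (some i) (some e)))
      else refs

-- unpack a non-(-1) find into a Nat occurrence with its facts

theorem pv_abs_rel (pat : List Char) (f : PySem.Set (List Char) → List Char → PySem.Set (List Char))
    (hg : pvGood pat) (hpat : pat ≠ []) :
    ∀ (fuel : Nat) (cs : List Char) (start : Nat) (refs : PySem.Set (List Char)),
      start ≤ cs.length → cs.length - start + 2 ≤ fuel →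
      pvLoopA pat f cs fuel (start : Int) refs = pvLoopR pat f fuel (cs.drop start) refs := by
  intro fuel
  induction fuel with
  | zero => intro cs start refs h1 h2; omega
  | succ fuel ih =>
    intro cs start refs hstart hfuel
    by_cases hga : PySem.Chars.find (cs.drop start) pat = -1
    · have hiabs : PySem.Chars.findFrom cs pat (start : Int) = -1 := by
        rw [PySem.Chars.findFrom_natCast cs pat start hstart, hga]; simp
      rw [pvLoopA, pvLoopR]
      simp [hiabs, hga]
    · obtain ⟨q, hq, hqpre, hqmin, hqle⟩ := pv_find_pos hpat hga
      rw [List.length_drop] at hqle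
      have hpatlen : 0 < pat.length := List.length_pos_iff.mpr hpat
      have hsq : start + q ≤ cs.length := by omega
      have hiabs : PySem.Chars.findFrom cs pat (start : Int) = ((start + q : Nat) : Int) := by
        rw [PySem.Chars.findFrom_natCast cs pat start hstart, hq, if_neg (by omega)]
        push_cast; ring
      have hdd : (cs.drop start).drop q = List.drop (start + q) cs := List.drop_drop
      by_cases hr : PySem.Chars.find (List.drop (start + q) cs) pvEE = -1
      · have heabs : PySem.Chars.findFrom cs pvEE ((start + q : Nat) : Int) = -1 := by
          rw [PySem.Chars.findFrom_natCast cs pvEE (start + q) hsq, hr]; simp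
        have herel : PySem.Chars.findFrom (cs.drop start) pvEE ((q : Nat) : Int) = -1 := by
          rw [PySem.Chars.findFrom_natCast (cs.drop start) pvEE q (by rw [List.length_drop]; omega),
            hdd, hr]
          simp
        rw [pvLoopA, pvLoopR]
        simp only [hiabs, hq, heabs, herel]
        rw [if_neg (show ¬(((start + q : Nat) : Int) = -1) from by omega)]
        rw [if_neg (show ¬(((q : Nat) : Int) = -1) from by omega)]
        rw [if_neg (show ¬((-1 : Int) ≠ -1) from by omega)]
        rw [if_neg (show ¬((-1 : Int) ≠ -1) from by omega)]
        -- abs side runs once more from start = cs.length and stops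
        obtain ⟨fuel', rfl⟩ : ∃ fuel', fuel = fuel' + 1 := ⟨fuel - 1, by omega⟩
        have hlast : PySem.Chars.findFrom cs pat ((cs.length : Nat) : Int) = -1 := by
          rw [PySem.Chars.findFrom_natCast cs pat cs.length le_rfl, List.drop_length]
          rw [pv_find_neg.mpr (by intro j hj; rw [List.drop_nil, List.prefix_nil] at hj; exact hpat hj)]
          simp
        rw [pvLoopA]
        simp [hlast]
      · obtain ⟨r, hrq, hrpre, hrmin, hrle⟩ := pv_find_pos (by simp [pvEE]) hr
        rw [List.length_drop] at hrle
        have hee2 : pvEE.length = 2 := rfl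
        rw [hee2] at hrle
        have heabs : PySem.Chars.findFrom cs pvEE ((start + q : Nat) : Int) =
            ((start + q + r : Nat) : Int) := by
          rw [PySem.Chars.findFrom_natCast cs pvEE (start + q) hsq, hrq, if_neg (by omega)]
          push_cast; ring
        have herel : PySem.Chars.findFrom (cs.drop start) pvEE ((q : Nat) : Int) =
            ((q + r : Nat) : Int) := by
          rw [PySem.Chars.findFrom_natCast (cs.drop start) pvEE q (by rw [List.length_drop]; omega),
            hdd, hrq, if_neg (by omega)]
          push_cast; ring
        -- q + r ≥ 1: the pattern cannot sit exactly on the separator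
        have hqr1 : 1 ≤ q + r := by
          by_contra hc
          have hq0 : q = 0 := by omega
          have hr0 : r = 0 := by omega
          subst hq0; subst hr0
          rw [← hdd] at hrpre
          simp only [List.drop_zero] at hrpre hqpre
          exact (pv_no_pat_at_sep hg hrpre).1 hqpre
        have hslice : PySem.List.slice cs (some ((start + q : Nat) : Int))
              (some ((start + q + r : Nat) : Int)) =
            PySem.List.slice (cs.drop start) (some ((q : Nat) : Int)) (some ((q + r : Nat) : Int)) := by
          rw [PySem.List.slice_natCast, PySem.List.slice_natCast, List.drop_drop]
          congr 1
          omega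
        rw [pvLoopA, pvLoopR]
        simp only [hiabs, hq, heabs, herel]
        rw [if_neg (show ¬(((start + q : Nat) : Int) = -1) from by omega)]
        rw [if_neg (show ¬(((q : Nat) : Int) = -1) from by omega)]
        rw [if_pos (show (((start + q + r : Nat) : Int)) ≠ -1 from by omega)]
        rw [if_pos (show (((q + r : Nat) : Int)) ≠ -1 from by omega)]
        rw [hslice]
        rw [show ((((q + r : Nat) : Int)).toNat) = q + r from by omega]
        have hrec := ih cs (start + q + r) (f refs
          (PySem.List.slice (cs.drop start) (some ((q : Nat) : Int)) (some ((q + r : Nat) : Int))))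
          (by omega) (by omega)
        rw [hrec, List.drop_drop, show start + (q + r) = start + q + r from by omega]

theorem pv_loopR_shift (pat : List Char)
    (f : PySem.Set (List Char) → List Char → PySem.Set (List Char)) (hpat : pat ≠ [])
    {s : List Char} (k : Nat) (hk : k ≤ s.length) (h : ∀ j < k, ¬ pat <+: s.drop j) :
    ∀ (fuel : Nat) (refs : PySem.Set (List Char)),
      pvLoopR pat f fuel s refs = pvLoopR pat f fuel (s.drop k) refs := by
  intro fuel refs
  cases fuel with
  | zero => rfl
  | succ fuel =>
    have hshift := pv_find_shift k h
    by_cases hga : PySem.Chars.find (s.drop k) pat = -1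
    · rw [hga, if_pos rfl] at hshift
      rw [pvLoopR, pvLoopR]
      simp [hshift, hga]
    · obtain ⟨q, hq, hqpre, hqmin, hqle⟩ := pv_find_pos hpat hga
      rw [List.length_drop] at hqle
      have hpatlen : 0 < pat.length := List.length_pos_iff.mpr hpat
      rw [hq, if_neg (by omega)] at hshift
      have hfs : PySem.Chars.find s pat = ((k + q : Nat) : Int) := by
        rw [hshift]; push_cast; ring
      have hdd : (s.drop k).drop q = List.drop (k + q) s := List.drop_drop
      by_cases hr : PySem.Chars.find (List.drop (k + q) s) pvEE = -1
      · have he1 : PySem.Chars.findFrom s pvEE ((k + q : Nat) : Int) = -1 := by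
          rw [PySem.Chars.findFrom_natCast s pvEE (k + q) (by omega), hr]; simp
        have he2 : PySem.Chars.findFrom (s.drop k) pvEE ((q : Nat) : Int) = -1 := by
          rw [PySem.Chars.findFrom_natCast (s.drop k) pvEE q (by rw [List.length_drop]; omega),
            hdd, hr]
          simp
        rw [pvLoopR, pvLoopR]
        simp only [hfs, hq, he1, he2]
        rw [if_neg (show ¬(((k + q : Nat) : Int) = -1) from by omega)]
        rw [if_neg (show ¬(((q : Nat) : Int) = -1) from by omega)]
        rw [if_neg (show ¬((-1 : Int) ≠ -1) from by omega)]
        rw [if_neg (show ¬((-1 : Int) ≠ -1) from by omega)]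
      · obtain ⟨r, hrq, hrpre, hrmin, hrle⟩ := pv_find_pos (by simp [pvEE]) hr
        rw [List.length_drop] at hrle
        have hee2 : pvEE.length = 2 := rfl
        rw [hee2] at hrle
        have he1 : PySem.Chars.findFrom s pvEE ((k + q : Nat) : Int) = ((k + q + r : Nat) : Int) := by
          rw [PySem.Chars.findFrom_natCast s pvEE (k + q) (by omega), hrq, if_neg (by omega)]
          push_cast; ring
        have he2 : PySem.Chars.findFrom (s.drop k) pvEE ((q : Nat) : Int) = ((q + r : Nat) : Int) := by
          rw [PySem.Chars.findFrom_natCast (s.drop k) pvEE q (by rw [List.length_drop]; omega),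
            hdd, hrq, if_neg (by omega)]
          push_cast; ring
        have hslice : PySem.List.slice s (some ((k + q : Nat) : Int)) (some ((k + q + r : Nat) : Int)) =
            PySem.List.slice (s.drop k) (some ((q : Nat) : Int)) (some ((q + r : Nat) : Int)) := by
          rw [PySem.List.slice_natCast, PySem.List.slice_natCast, List.drop_drop]
          congr 1
          omega
        rw [pvLoopR, pvLoopR]
        simp only [hfs, hq, he1, he2]
        rw [if_neg (show ¬(((k + q : Nat) : Int) = -1) from by omega)]
        rw [if_neg (show ¬(((q : Nat) : Int) = -1) from by omega)]
        rw [if_pos (show (((k + q + r : Nat) : Int)) ≠ -1 from by omega)]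
        rw [if_pos (show (((q + r : Nat) : Int)) ≠ -1 from by omega)]
        rw [hslice]
        rw [show ((((k + q + r : Nat) : Int)).toNat) = k + q + r from by omega]
        rw [show ((((q + r : Nat) : Int)).toNat) = q + r from by omega]
        rw [List.drop_drop, show k + (q + r) = k + q + r from by omega]

theorem pv_fold_nomatch {pat : List Char}
    {f : PySem.Set (List Char) → List Char → PySem.Set (List Char)}
    {chunks : List (List Char)} (h : ∀ c ∈ chunks, PySem.Chars.find c pat = -1)
    (refs : PySem.Set (List Char)) : chunks.foldl (pvChunkStep pat f) refs = refs := by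
  induction chunks generalizing refs with
  | nil => rfl
  | cons c rest ih =>
    rw [List.foldl_cons]
    rw [show pvChunkStep pat f refs c = refs from by
      unfold pvChunkStep; simp [h c (by simp)]]
    exact ih (fun c hc => h c (by simp [hc])) refs

-- first pattern occurrence of s lies in chunk 0 (= s.take p) when it is before the separator

theorem pv_find_take {pat s : List Char} {q p : Nat} (hpat : pat ≠ [])
    (hq : PySem.Chars.find s pat = (q : Int)) (hqp : q + pat.length ≤ p) :
    PySem.Chars.find (s.take p) pat = (q : Int) := by
  obtain ⟨q', hq', hqpre, hqmin, _⟩ := pv_find_pos hpat (by rw [hq]; omega)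
  have hqq : q' = q := by omega
  subst hqq
  apply pv_find_eq
  · rw [List.drop_take]
    rw [List.prefix_take_iff]
    exact ⟨hqpre, by omega⟩
  · intro i hi hc
    rw [List.drop_take, List.prefix_take_iff] at hc
    exact hqmin i hi hc.1

-- no pattern occurrence in s.take p when the first occurrence of s is past p

theorem pv_find_take_neg {pat s : List Char} {p : Nat} (hpat : pat ≠ [])
    (hmin : ∀ j < p, ¬ pat <+: s.drop j) :
    PySem.Chars.find (s.take p) pat = -1 := by
  rw [pv_find_neg]
  intro j hj
  rw [List.drop_take, List.prefix_take_iff] at hj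
  obtain ⟨hpre, hlen⟩ := hj
  have hjp : j < p := by
    have := List.length_pos_iff.mpr hpat
    omega
  exact hmin j hjp hpre

theorem pv_loopR_chunks (pat : List Char)
    (f : PySem.Set (List Char) → List Char → PySem.Set (List Char))
    (hg : pvGood pat) (hpat : pat ≠ []) :
    ∀ (n : Nat) (s : List Char), s.length ≤ n → ∀ (fuel : Nat), s.length + 1 ≤ fuel →
      ∀ (refs : PySem.Set (List Char)),
      pvLoopR pat f fuel s refs = ((pvChunks s).dropLast).foldl (pvChunkStep pat f) refs := by
  intro n
  induction n with
  | zero =>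
    intro s hs fuel hfuel refs
    have hnil : s = [] := List.length_eq_zero_iff.mp (by omega)
    subst hnil
    obtain ⟨fuel', rfl⟩ : ∃ fuel', fuel = fuel' + 1 := ⟨fuel - 1, by omega⟩
    have hpe : PySem.Chars.find ([] : List Char) pvEE = -1 :=
      pv_find_neg.mpr (by intro j hj; rw [List.drop_nil, List.prefix_nil] at hj; simp [pvEE] at hj)
    have hpa : PySem.Chars.find ([] : List Char) pat = -1 :=
      pv_find_neg.mpr (by intro j hj; rw [List.drop_nil, List.prefix_nil] at hj; exact hpat hj)
    rw [pvChunks_neg hpe, pvLoopR]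
    simp [hpa]
  | succ n ih =>
    intro s hs fuel hfuel refs
    obtain ⟨fuel', rfl⟩ : ∃ fuel', fuel = fuel' + 1 := ⟨fuel - 1, by omega⟩
    have hpatlen : 0 < pat.length := List.length_pos_iff.mpr hpat
    by_cases hpe : PySem.Chars.find s pvEE = -1
    · -- no separator: no chunk survives dropLast, and the loop cannot close a tag
      rw [pvChunks_neg hpe]
      rw [show ([s] : List (List Char)).dropLast = [] from rfl, List.foldl_nil]
      rw [pvLoopR]
      by_cases hpa : PySem.Chars.find s pat = -1
      · simp [hpa]
      · obtain ⟨q, hq, hqpre, hqmin, hqle⟩ := pv_find_pos hpat hpa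
        have he : PySem.Chars.findFrom s pvEE ((q : Nat) : Int) = -1 := by
          rw [PySem.Chars.findFrom_natCast s pvEE q (by omega)]
          rw [show PySem.Chars.find (List.drop q s) pvEE = -1 from
            pv_find_neg.mpr (by
              intro j hj
              rw [List.drop_drop] at hj
              exact pv_find_neg.mp hpe _ hj)]
          simp
        simp only [hq, he]
        rw [if_neg (show ¬(((q : Nat) : Int) = -1) from by omega)]
        rw [if_neg (show ¬((-1 : Int) ≠ -1) from by omega)]
    · obtain ⟨p, hp, hppre, hpmin, hple⟩ := pv_find_pos (by simp [pvEE]) hpe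
      have hee2 : pvEE.length = 2 := rfl
      rw [hee2] at hple
      rw [pvChunks_pos hp]
      rw [List.dropLast_cons_of_ne_nil (pvChunks_ne_nil _)]
      rw [List.foldl_cons]
      by_cases hpa : PySem.Chars.find s pat = -1
      · -- pattern nowhere: loop stops at once, every chunk step is a no-op
        rw [pvLoopR]
        simp only [hpa]
        simp only [if_true]
        rw [show pvChunkStep pat f refs (s.take p) = refs from by
          unfold pvChunkStep
          simp [pv_find_take_neg hpat (fun j _ => pv_find_neg.mp hpa j)]]
        rw [pv_fold_nomatch (fun c hc => pv_chunks_nomatch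
          (pv_find_neg.mpr (by
            intro j hj
            rw [List.drop_drop] at hj
            exact pv_find_neg.mp hpa _ hj)) c ((List.dropLast_sublist _).subset hc)) refs]
      · obtain ⟨q, hq, hqpre, hqmin, hqle⟩ := pv_find_pos hpat hpa
        have hqp : q ≠ p ∧ q ≠ p + 1 := by
          constructor
          · intro hc; subst hc; exact (pv_no_pat_at_sep hg hppre).1 hqpre
          · intro hc; subst hc; exact (pv_no_pat_at_sep hg hppre).2 hqpre
        rcases lt_or_ge q p with hlt | hge
        · -- first pattern occurrence inside chunk 0
          have hov : q + pat.length ≤ p := pv_no_overlap hg hqpre hppre hlt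
          have he : PySem.Chars.findFrom s pvEE ((q : Nat) : Int) = ((p : Nat) : Int) := by
            rw [PySem.Chars.findFrom_natCast s pvEE q (by omega)]
            rw [show PySem.Chars.find (List.drop q s) pvEE = ((p - q : Nat) : Int) from by
              apply pv_find_eq
              · rw [List.drop_drop, show q + (p - q) = p from by omega]; exact hppre
              · intro i hi hc
                rw [List.drop_drop] at hc
                exact hpmin (q + i) (by omega) hc]
            rw [if_neg (by omega)]
            omega
          rw [pvLoopR]
          simp only [hq, he]
          rw [if_neg (show ¬(((q : Nat) : Int) = -1) from by omega)]
          rw [if_pos (show (((p : Nat) : Int)) ≠ -1 from by omega)]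
          rw [show pvChunkStep pat f refs (s.take p) =
              f refs (PySem.List.slice s (some ((q : Nat) : Int)) (some ((p : Nat) : Int))) from by
            unfold pvChunkStep
            simp only [pv_find_take hpat hq hov]
            rw [if_pos (show (((q : Nat) : Int)) ≠ -1 from by omega)]
            rw [PySem.List.slice_from _ (by omega), PySem.List.slice_natCast]
            rw [show ((q : Int)).toNat = q from by omega]
            rw [List.drop_take]]
          rw [show (((p : Nat) : Int)).toNat = p from by omega]
          rw [pv_loopR_shift pat f hpat 2 (by rw [List.length_drop]; omega)
            (by
              intro j hj
              rw [List.drop_drop]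
              interval_cases j
              · exact (pv_no_pat_at_sep hg (by simpa using hppre)).1
              · exact (pv_no_pat_at_sep hg (by simpa using hppre)).2) fuel' _]
          rw [List.drop_drop]
          exact ih (s.drop (p + 2)) (by rw [List.length_drop]; omega) fuel'
            (by rw [List.length_drop]; omega) _
        · -- first pattern occurrence after chunk 0: chunk 0 is a no-op, shift past the separator
          have hq2 : p + 2 ≤ q := by omega
          rw [show pvChunkStep pat f refs (s.take p) = refs from by
            have hno : PySem.Chars.find (List.take p s) pat = -1 :=
              pv_find_take_neg hpat (fun j hj => hqmin j (by omega))
            unfold pvChunkStep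
            simp [hno]]
          rw [pv_loopR_shift pat f hpat (p + 2) (by omega)
            (fun j hj => hqmin j (by omega)) (fuel' + 1) refs]
          exact ih (s.drop (p + 2)) (by rw [List.length_drop]; omega) (fuel' + 1)
            (by rw [List.length_drop]; omega) refs

theorem pv_scan_nomatch {pat : List Char}
    {f : PySem.Set (List Char) → List Char → PySem.Set (List Char)}
    {chunks : List (List Char)} (h : ∀ c ∈ chunks, PySem.Chars.find c pat = -1)
    (refs : PySem.Set (List Char)) : pvExtScan pat f chunks refs = refs := by
  induction chunks with
  | nil => rfl
  | cons c rest ih =>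
    rw [pvExtScan]
    simp only [h c (by simp)]
    rw [if_neg (by omega)]
    exact ih (fun c hc => h c (by simp [hc]))

theorem pv_isIn_find {pat s : List Char} :
    PySem.Chars.isIn pat s = true ↔ ¬ PySem.Chars.find s pat = -1 := by
  rw [PySem.Chars.isIn_iff_infix]
  have := PySem.Chars.find_eq_neg_one_iff s pat
  tauto

theorem pv_extA_shift (pat : List Char)
    (f : PySem.Set (List Char) → List Char → PySem.Set (List Char)) (hpat : pat ≠ [])
    {s : List Char} (k : Nat) (hk : k ≤ s.length) (h : ∀ j < k, ¬ pat <+: s.drop j) :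
    ∀ refs, pvExtA pat f s refs = pvExtA pat f (s.drop k) refs := by
  intro refs
  unfold pvExtA
  by_cases hin : PySem.Chars.isIn pat (s.drop k) = true
  · have hga : ¬ PySem.Chars.find (s.drop k) pat = -1 := pv_isIn_find.mp hin
    obtain ⟨q, hq, hqpre, hqmin, hqle⟩ := pv_find_pos hpat hga
    rw [List.length_drop] at hqle
    have hpatlen : 0 < pat.length := List.length_pos_iff.mpr hpat
    have hfs : PySem.Chars.find s pat = ((k + q : Nat) : Int) := by
      rw [pv_find_shift k h, hq, if_neg (by omega)]; push_cast; ring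
    have hins : PySem.Chars.isIn pat s = true := pv_isIn_find.mpr (by rw [hfs]; omega)
    rw [if_pos hins, if_pos hin]
    simp only [hfs, hq]
    have hdd : (s.drop k).drop q = List.drop (k + q) s := List.drop_drop
    by_cases hr : PySem.Chars.find (List.drop (k + q) s) pvEE = -1
    · have he1 : PySem.Chars.findFrom s pvEE ((k + q : Nat) : Int) = -1 := by
        rw [PySem.Chars.findFrom_natCast s pvEE (k + q) (by omega), hr]; simp
      have he2 : PySem.Chars.findFrom (s.drop k) pvEE ((q : Nat) : Int) = -1 := by
        rw [PySem.Chars.findFrom_natCast (s.drop k) pvEE q (by rw [List.length_drop]; omega),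
          hdd, hr]
        simp
      rw [he1, he2]
      rw [if_neg (by omega), if_neg (by omega)]
    · obtain ⟨r, hrq, hrpre, hrmin, hrle⟩ := pv_find_pos (by simp [pvEE]) hr
      rw [List.length_drop] at hrle
      have hee2 : pvEE.length = 2 := rfl
      rw [hee2] at hrle
      have he1 : PySem.Chars.findFrom s pvEE ((k + q : Nat) : Int) = ((k + q + r : Nat) : Int) := by
        rw [PySem.Chars.findFrom_natCast s pvEE (k + q) (by omega), hrq, if_neg (by omega)]
        push_cast; ring
      have he2 : PySem.Chars.findFrom (s.drop k) pvEE ((q : Nat) : Int) = ((q + r : Nat) : Int) := by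
        rw [PySem.Chars.findFrom_natCast (s.drop k) pvEE q (by rw [List.length_drop]; omega),
          hdd, hrq, if_neg (by omega)]
        push_cast; ring
      rw [he1, he2]
      rw [if_pos (by constructor <;> omega), if_pos (by constructor <;> omega)]
      congr 1
      rw [PySem.List.slice_natCast, PySem.List.slice_natCast, List.drop_drop]
      congr 1
      omega
  · have hga : PySem.Chars.find (s.drop k) pat = -1 := by
      by_contra hc
      exact hin (pv_isIn_find.mpr hc)
    have hfs : PySem.Chars.find s pat = -1 := by
      rw [pv_find_shift k h, hga]; simp
    have hins : ¬ PySem.Chars.isIn pat s = true := by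
      intro hc
      exact (pv_isIn_find.mp hc) hfs
    rw [if_neg hins, if_neg hin]

theorem pv_extA_chunks (pat : List Char)
    (f : PySem.Set (List Char) → List Char → PySem.Set (List Char))
    (hg : pvGood pat) (hpat : pat ≠ []) :
    ∀ (n : Nat) (s : List Char), s.length ≤ n → ∀ (refs : PySem.Set (List Char)),
      pvExtA pat f s refs = pvExtScan pat f ((pvChunks s).dropLast) refs := by
  intro n
  induction n with
  | zero =>
    intro s hs refs
    have hnil : s = [] := List.length_eq_zero_iff.mp (by omega)
    subst hnil
    have hpe : PySem.Chars.find ([] : List Char) pvEE = -1 :=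
      pv_find_neg.mpr (by intro j hj; rw [List.drop_nil, List.prefix_nil] at hj; simp [pvEE] at hj)
    have hpa : PySem.Chars.find ([] : List Char) pat = -1 :=
      pv_find_neg.mpr (by intro j hj; rw [List.drop_nil, List.prefix_nil] at hj; exact hpat hj)
    rw [pvChunks_neg hpe]
    rw [show (([[]] : List (List Char))).dropLast = [] from rfl]
    rw [pvExtScan]
    unfold pvExtA
    rw [if_neg (by intro hc; exact (pv_isIn_find.mp hc) hpa)]
  | succ n ih =>
    intro s hs refs
    have hpatlen : 0 < pat.length := List.length_pos_iff.mpr hpat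
    by_cases hpe : PySem.Chars.find s pvEE = -1
    · rw [pvChunks_neg hpe]
      rw [show ([s] : List (List Char)).dropLast = [] from rfl]
      rw [pvExtScan]
      unfold pvExtA
      by_cases hpa : PySem.Chars.find s pat = -1
      · rw [if_neg (by intro hc; exact (pv_isIn_find.mp hc) hpa)]
      · obtain ⟨q, hq, hqpre, hqmin, hqle⟩ := pv_find_pos hpat hpa
        have he : PySem.Chars.findFrom s pvEE ((q : Nat) : Int) = -1 := by
          rw [PySem.Chars.findFrom_natCast s pvEE q (by omega)]
          rw [show PySem.Chars.find (List.drop q s) pvEE = -1 from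
            pv_find_neg.mpr (by
              intro j hj
              rw [List.drop_drop] at hj
              exact pv_find_neg.mp hpe _ hj)]
          simp
        rw [if_pos (pv_isIn_find.mpr hpa)]
        simp only [hq, he]
        rw [if_neg (by omega)]
    · obtain ⟨p, hp, hppre, hpmin, hple⟩ := pv_find_pos (by simp [pvEE]) hpe
      have hee2 : pvEE.length = 2 := rfl
      rw [hee2] at hple
      rw [pvChunks_pos hp]
      rw [List.dropLast_cons_of_ne_nil (pvChunks_ne_nil _)]
      rw [pvExtScan]
      by_cases hpa : PySem.Chars.find s pat = -1
      · have hno : PySem.Chars.find (List.take p s) pat = -1 :=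
          pv_find_take_neg hpat (fun j _ => pv_find_neg.mp hpa j)
        simp only [hno]
        rw [if_neg (by omega)]
        rw [show pvExtA pat f s refs = refs from by
          unfold pvExtA
          rw [if_neg (by intro hc; exact (pv_isIn_find.mp hc) hpa)]]
        rw [pv_scan_nomatch (fun c hc => pv_chunks_nomatch
          (pv_find_neg.mpr (by
            intro j hj
            rw [List.drop_drop] at hj
            exact pv_find_neg.mp hpa _ hj)) c ((List.dropLast_sublist _).subset hc)) refs]
      · obtain ⟨q, hq, hqpre, hqmin, hqle⟩ := pv_find_pos hpat hpa
        rcases lt_or_ge q p with hlt | hge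
        · have hov : q + pat.length ≤ p := pv_no_overlap hg hqpre hppre hlt
          have he : PySem.Chars.findFrom s pvEE ((q : Nat) : Int) = ((p : Nat) : Int) := by
            rw [PySem.Chars.findFrom_natCast s pvEE q (by omega)]
            rw [show PySem.Chars.find (List.drop q s) pvEE = ((p - q : Nat) : Int) from by
              apply pv_find_eq
              · rw [List.drop_drop, show q + (p - q) = p from by omega]; exact hppre
              · intro i hi hc
                rw [List.drop_drop] at hc
                exact hpmin (q + i) (by omega) hc]
            rw [if_neg (by omega)]
            omega
          rw [show PySem.Chars.find (List.take p s) pat = ((q : Nat) : Int) from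
            pv_find_take hpat hq hov]
          rw [if_pos (by omega)]
          unfold pvExtA
          rw [if_pos (pv_isIn_find.mpr hpa)]
          simp only [hq, he]
          rw [if_pos (by constructor <;> omega)]
          congr 1
          rw [PySem.List.slice_from _ (show (0:Int) ≤ ((q : Nat) : Int) from by omega),
            PySem.List.slice_natCast]
          rw [show (((q : Nat) : Int)).toNat = q from by omega]
          rw [List.drop_take]
        · have hq2 : p + 2 ≤ q := by
            have hqp : q ≠ p ∧ q ≠ p + 1 := by
              constructor
              · intro hc; subst hc; exact (pv_no_pat_at_sep hg hppre).1 hqpre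
              · intro hc; subst hc; exact (pv_no_pat_at_sep hg hppre).2 hqpre
            omega
          have hno : PySem.Chars.find (List.take p s) pat = -1 :=
            pv_find_take_neg hpat (fun j hj => hqmin j (by omega))
          simp only [hno]
          rw [if_neg (by omega)]
          rw [pv_extA_shift pat f hpat (p + 2) (by omega) (fun j hj => hqmin j (by omega)) refs]
          exact ih (s.drop (p + 2)) (by rw [List.length_drop]; omega) refs

-- ===== VERDICT (by name: the statement is the Claim_ definition above) =====
theorem find_template_references_spec : Claim_equal_find_template_references := by
  intro tc _
  unfold Spec_find_template_references find_template_references find_template_references_alt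
  rw [pv_splitOn_eq_chunks]
  rw [pv_extA_chunks pvExt pvAddName pvGood_ext (by decide) tc.toList.length tc.toList le_rfl _]
  rw [show ((0 : Int)) = (((0 : Nat) : Int)) from by norm_num]
  rw [pv_abs_rel pvInc pvAddName pvGood_inc (by decide) _ tc.toList 0 _ (by omega) (by omega)]
  rw [pv_abs_rel pvLoad pvAddLoad pvGood_load (by decide) _ tc.toList 0 _ (by omega) (by omega)]
  rw [List.drop_zero]
  rw [pv_loopR_chunks pvInc pvAddName pvGood_inc (by decide) tc.toList.length tc.toList le_rfl
    _ (by omega) _]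
  rw [pv_loopR_chunks pvLoad pvAddLoad pvGood_load (by decide) tc.toList.length tc.toList le_rfl
    _ (by omega) _]
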